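-- pv_equiv track=rewrite | github.com/halliday-onice/Data-Structures | Greedy Algorithm/buy_two_chocolates.py | buy2_chocolates
-- ===== SOURCE A (Python) =====
-- def buy2_chocolates(prices: list, money: int)-> int:
--   min_price1 = float('inf')
--   min_price2 = float('inf')
--   #the goal here to catch the two smallest values
--   for i in prices:
--     if i < min_price1:
--       min_price2 = min_price1
--       min_price1 = i
--     elif i < min_price2:
--       min_price2 = i
--
--   two_min_values = min_price1 + min_price2
--
--   if two_min_values <= money:
--     return money - two_min_values
--
--   return money
-- ===== SOURCE B (Python) =====
-- def buy2_chocolates(prices: list, money: int) -> int: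
--   s = sorted(prices)
--   if len(s) < 2:
--     return money
--   total = s[0] + s[1]
--   if total <= money:
--     return money - total
--   return money
-- ===== Notes on version B (the rewrite author's own statement) =====
-- stated objective: idiomatic
-- what changed: Replaces the hand-written single-pass two-minimum tracking (with float('inf') sentinels) by sorting a copy and reading the two smallest prices off the front, with an explicit short-list check instead of the inf-sum fallthrough.
import Mathlib
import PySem

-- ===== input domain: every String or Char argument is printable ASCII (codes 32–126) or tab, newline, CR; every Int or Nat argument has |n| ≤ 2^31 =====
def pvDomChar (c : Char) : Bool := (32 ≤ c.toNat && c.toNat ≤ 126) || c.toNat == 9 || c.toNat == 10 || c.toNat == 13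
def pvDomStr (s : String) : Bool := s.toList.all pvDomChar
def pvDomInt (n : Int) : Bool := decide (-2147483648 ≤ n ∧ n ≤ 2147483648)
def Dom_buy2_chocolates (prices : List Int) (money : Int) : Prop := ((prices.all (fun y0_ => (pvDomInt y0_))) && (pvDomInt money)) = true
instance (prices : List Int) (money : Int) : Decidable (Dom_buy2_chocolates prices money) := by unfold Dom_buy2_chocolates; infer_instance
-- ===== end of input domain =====

-- B replaces A's single-pass two-minimum tracking by a sort of a copy (input not mutated) plus
-- an explicit short-list check; equivalence of return values is proved on all inputs.

-- ===== PORT A =====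
-- float('inf') sentinels are modelled exactly by Option Int with none = inf:
-- 'i < m' with m = inf is always true, and min1 + min2 is finite iff both are set,
-- otherwise the sum is inf and exceeds any int money, so A falls through to 'return money'.
def buy2_lt (i : Int) : Option Int → Bool
  | none => true
  | some v => i < v

def buy2_step (st : Option Int × Option Int) (i : Int) : Option Int × Option Int :=
  if buy2_lt i st.1 then (some i, st.1)
  else if buy2_lt i st.2 then (st.1, some i)
  else st

def buy2_chocolates (prices : List Int) (money : Int) : Int :=
  let st := prices.foldl buy2_step (none, none)
  match st with
  | (some a, some b) =>
      let two_min_values := a + b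
      if two_min_values ≤ money then money - two_min_values else money
  | _ => money  -- two_min_values is inf here: 'two_min_values <= money' is false

-- ===== PORT B =====
def buy2_chocolates_alt (prices : List Int) (money : Int) : Int :=
  let s := PySem.List.sorted prices (fun x => x) false
  match s with
  | a :: b :: _ =>   -- len(s) ≥ 2; s[0] = a, s[1] = b
      let total := a + b
      if total ≤ money then money - total else money
  | _ => money       -- len(s) < 2

-- ===== PRECONDITION & SPEC =====
def Spec_buy2_chocolates (prices : List Int) (money : Int) (out : Int) : Prop := out = buy2_chocolates_alt prices money
instance (prices : List Int) (money : Int) (out : Int) : Decidable (Spec_buy2_chocolates prices money out) := by unfold Spec_buy2_chocolates; infer_instance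

-- ===== CLAIM (what is proved, stated in full; the proofs are below) =====
def Claim_equal_buy2_chocolates : Prop := ∀ (prices : List Int) (money : Int), Dom_buy2_chocolates prices money → Spec_buy2_chocolates prices money (buy2_chocolates prices money)

-- ===== LEMMAS AND PROOFS =====

-- the first two elements of a list, encoded as A's sentinel pair
def buy2_pairOf : List Int → Option Int × Option Int
  | [] => (none, none)
  | [a] => (some a, none)
  | a :: b :: _ => (some a, some b)

-- inserting x into any list changes its first-two pair exactly as A's loop step does
theorem buy2_pairOf_insertBy (x : Int) (s : List Int) :
    buy2_pairOf (PySem.List.insertBy (fun a b => decide (a < b)) x s)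
      = buy2_step (buy2_pairOf s) x := by
  match s with
  | [] => simp [PySem.List.insertBy, buy2_pairOf, buy2_step, buy2_lt]
  | [a] =>
      by_cases h : x < a <;>
        simp [PySem.List.insertBy, buy2_pairOf, buy2_step, buy2_lt, h]
  | a :: b :: t =>
      by_cases h1 : x < a
      · simp [PySem.List.insertBy, buy2_pairOf, buy2_step, buy2_lt, h1]
      · by_cases h2 : x < b <;>
          simp [PySem.List.insertBy, buy2_pairOf, buy2_step, buy2_lt, h1, h2]

-- A's fold computes exactly the first-two pair of the sorted list
theorem buy2_fold_eq_pairOf_sorted (prices : List Int) :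
    prices.foldl buy2_step (none, none)
      = buy2_pairOf (PySem.List.sorted prices (fun x => x) false) := by
  rw [PySem.List.sorted_eq_foldl_insertBy]
  induction prices using List.reverseRecOn with
  | nil => rfl
  | append_singleton l x ih =>
      rw [List.foldl_append, List.foldl_append]
      simp only [List.foldl_cons, List.foldl_nil]
      rw [ih, buy2_pairOf_insertBy]

-- ===== VERDICT (by name: the statement is the Claim_ definition above) =====
theorem buy2_chocolates_spec : Claim_equal_buy2_chocolates := by
  intro prices money _
  unfold Spec_buy2_chocolates buy2_chocolates buy2_chocolates_alt
  rw [buy2_fold_eq_pairOf_sorted]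
  cases h : PySem.List.sorted prices (fun x => x) false with
  | nil => simp [buy2_pairOf]
  | cons a t =>
      cases t with
      | nil => simp [buy2_pairOf]
      | cons b r => simp [buy2_pairOf]
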